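-- pv_equiv track=rewrite | github.com/barsiparaleigos-cloud/barsi01 | jobs/map_cnpj_to_ticker.py | _candidate_indices
-- ===== SOURCE A (Python) =====
-- from collections import Counter
--
-- def _candidate_indices(query_tokens: list[str], token_index: dict[str, list[int]]) -> list[int]:
--     if not query_tokens:
--         return []
--
--     counts: Counter[int] = Counter()
--     for tok in query_tokens:
--         for idx in token_index.get(tok, []):
--             counts[idx] += 1
--
--     if not counts:
--         return []
--
--     # pega os melhores candidatos por overlap de tokens (barato)
--     most_common = counts.most_common(400)
--     return [idx for idx, _ in most_common]
-- ===== SOURCE B (Python) =====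
-- def _candidate_indices(query_tokens: list[str], token_index: dict[str, list[int]]) -> list[int]:
--     if not query_tokens:
--         return []
--
--     counts: dict[int, int] = {}
--     for tok in query_tokens:
--         for idx in token_index.get(tok, []):
--             counts[idx] = counts.get(idx, 0) + 1
--
--     if not counts:
--         return []
--
--     # counting-sort style selection: bucket indices by their overlap count
--     # (buckets filled in first-encountered order = Counter insertion order,
--     # which reproduces most_common's stable tie-breaking)
--     buckets: dict[int, list[int]] = {}
--     for idx, c in counts.items():
--         buckets.setdefault(c, []).append(idx)
--
--     out: list[int] = []
--     for c in range(max(buckets), 0, -1):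
--         for idx in buckets.get(c, ()):
--             out.append(idx)
--             if len(out) == 400:
--                 return out
--     return out
-- ===== Notes on version B (the rewrite author's own statement) =====
-- stated objective: alternative
-- what changed: B replaces Counter.most_common(400) (heap/sort-based top-k selection) with a counting-sort style selection: indices are bucketed by their overlap count in insertion order, then collected from the maximum count downwards with an early stop at 400.
import Mathlib
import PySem

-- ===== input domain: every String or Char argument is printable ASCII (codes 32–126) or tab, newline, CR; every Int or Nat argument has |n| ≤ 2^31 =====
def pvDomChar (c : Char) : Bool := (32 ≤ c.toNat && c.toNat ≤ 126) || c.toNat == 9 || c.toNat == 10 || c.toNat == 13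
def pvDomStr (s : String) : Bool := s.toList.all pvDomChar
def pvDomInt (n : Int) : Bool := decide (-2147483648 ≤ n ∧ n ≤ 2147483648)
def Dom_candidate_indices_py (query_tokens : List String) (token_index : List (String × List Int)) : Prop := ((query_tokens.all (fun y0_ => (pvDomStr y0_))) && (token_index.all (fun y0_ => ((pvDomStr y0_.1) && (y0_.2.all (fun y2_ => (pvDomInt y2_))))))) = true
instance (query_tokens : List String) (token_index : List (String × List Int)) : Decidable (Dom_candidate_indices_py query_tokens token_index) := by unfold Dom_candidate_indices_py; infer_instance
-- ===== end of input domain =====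

-- B replaces Counter.most_common(400) (a heap/sort selection) by a counting-sort style
-- bucket selection from the maximum count downwards; the counting loop is kept.

-- ===== PORT A =====
-- port of A: Counter loop, then most_common(400) = stable sort by count descending, take 400
def candidate_indices_py (query_tokens : List String) (token_index : List (String × List Int)) : List Int :=
  if query_tokens = [] then []
  else
    let tidx := PySem.Dict.ofList token_index
    let counts := query_tokens.foldl
      (fun d tok => (tidx.getD tok []).foldl (fun d idx => d.modify idx 0 (· + 1)) d)
      (PySem.Dict.empty : PySem.Dict Int Int)
    if counts.items = [] then []
    else ((PySem.List.sorted counts.items (fun p => p.2) true).take 400).map (fun p => p.1)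

-- ===== PORT B =====
-- inner loop of B: append the bucket's indices one by one, returning early (flag true) at 400
def pvTakeAppend : List Int → List Int → List Int × Bool
  | out, [] => (out, false)
  | out, x :: rest =>
      let out' := out ++ [x]
      if out'.length = 400 then (out', true) else pvTakeAppend out' rest

-- outer loop of B: 'for c in range(mx, 0, -1)'; fuel m is the current count value
def pvCollect (b : PySem.Dict Int (List Int)) : Nat → List Int → List Int
  | 0, out => out
  | m + 1, out =>
      match pvTakeAppend out (b.getD ((m : Int) + 1) []) with
      | (out', true) => out'
      | (out', false) => pvCollect b m out'

def candidate_indices_py_alt (query_tokens : List String) (token_index : List (String × List Int)) : List Int :=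
  if query_tokens = [] then []
  else
    let tidx := PySem.Dict.ofList token_index
    let counts := query_tokens.foldl
      (fun d tok => (tidx.getD tok []).foldl (fun d idx => d.insert idx (d.getD idx 0 + 1)) d)
      (PySem.Dict.empty : PySem.Dict Int Int)
    if counts.items = [] then []
    else
      -- buckets.setdefault(c, []).append(idx)
      let buckets := counts.items.foldl (fun d p => d.modify p.2 [] (· ++ [p.1])) PySem.Dict.empty
      match PySem.List.max? buckets.keys (fun c => c) with
      | none => []   -- unreachable: counts is nonempty, so buckets has a key
      | some mx => pvCollect buckets mx.toNat []

-- ===== PRECONDITION & SPEC =====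
def Spec_candidate_indices_py (query_tokens : List String) (token_index : List (String × List Int)) (out : List Int) : Prop := out = candidate_indices_py_alt query_tokens token_index
instance (query_tokens : List String) (token_index : List (String × List Int)) (out : List Int) : Decidable (Spec_candidate_indices_py query_tokens token_index out) := by unfold Spec_candidate_indices_py; infer_instance

-- ===== CLAIM (what is proved, stated in full; the proofs are below) =====
def Claim_equal_candidate_indices_py : Prop := ∀ (query_tokens : List String) (token_index : List (String × List Int)), Dom_candidate_indices_py query_tokens token_index → Spec_candidate_indices_py query_tokens token_index (candidate_indices_py query_tokens token_index)

-- ===== LEMMAS AND PROOFS =====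

-- [m, m-1, ..., 1] : the count values visited by B's outer loop
def pvDescList : Nat → List Int
  | 0 => []
  | m + 1 => ((m : Int) + 1) :: pvDescList m

theorem pvMem_descList (m : Nat) (c : Int) : c ∈ pvDescList m ↔ 1 ≤ c ∧ c ≤ (m : Int) := by
  induction m with
  | zero => simp [pvDescList]; omega
  | succ k ih => simp [pvDescList, ih]; omega

theorem pvPairwise_descList (m : Nat) : (pvDescList m).Pairwise (· > ·) := by
  induction m with
  | zero => simp [pvDescList]
  | succ k ih =>
      refine List.Pairwise.cons (fun c hc => ?_) ih
      have := (pvMem_descList k c).1 hc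
      omega

theorem pvInsertBy_append (before : Int × Int → Int × Int → Bool) (x : Int × Int)
    (l r : List (Int × Int)) (h : ∀ y ∈ l, before x y = false) :
    PySem.List.insertBy before x (l ++ r) = l ++ PySem.List.insertBy before x r := by
  induction l with
  | nil => simp
  | cons y ys ih =>
      have hy : before x y = false := h y (by simp)
      simp [PySem.List.insertBy, hy, ih (fun z hz => h z (by simp [hz]))]

theorem pvInsertBy_all (before : Int × Int → Int × Int → Bool) (x : Int × Int)
    (l : List (Int × Int)) (h : ∀ y ∈ l, before x y = true) :
    PySem.List.insertBy before x l = x :: l := by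
  cases l with
  | nil => rfl
  | cons y ys => simp [PySem.List.insertBy, h y (by simp)]

theorem pvInsert_grouped (cs : List Int) (x : Int × Int) (g : Int → List (Int × Int))
    (hcs : cs.Pairwise (· > ·)) (hg : ∀ c ∈ cs, ∀ p ∈ g c, p.2 = c) (hx : x.2 ∈ cs) :
    PySem.List.insertBy (fun a b => decide (b.2 < a.2)) x (cs.flatMap g)
      = cs.flatMap (fun c => g c ++ if x.2 = c then [x] else []) := by
  induction cs with
  | nil => cases hx
  | cons c cs' ih =>
      have hlt : ∀ c' ∈ cs', c' < c := fun c' hc' => (List.pairwise_cons.1 hcs).1 c' hc'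
      by_cases hxc : x.2 = c
      · have h1 : ∀ y ∈ g c, (fun a b => decide (b.2 < a.2)) x y = false := by
          intro y hy
          have := hg c (by simp) y hy
          simp [this, hxc]
        have h2 : ∀ y ∈ cs'.flatMap g, (fun a b => decide (b.2 < a.2)) x y = true := by
          intro y hy
          obtain ⟨c', hc', hyc'⟩ := List.mem_flatMap.1 hy
          have := hg c' (by simp [hc']) y hyc'
          have := hlt c' hc'
          simp_all
        have hno : ∀ c' ∈ cs', ¬ (x.2 = c') := by
          intro c' hc' h
          have := hlt c' hc'; omega
        rw [List.flatMap_cons,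
          pvInsertBy_append (fun a b => decide (b.2 < a.2)) x (g c) (cs'.flatMap g) h1,
          pvInsertBy_all (fun a b => decide (b.2 < a.2)) x (cs'.flatMap g) h2,
          List.flatMap_cons, if_pos hxc,
          List.flatMap_congr (fun c' hc' => by simp [hno c' hc'] : ∀ c' ∈ cs',
            (fun c => g c ++ if x.2 = c then [x] else []) c' = g c')]
        simp
      · have hx' : x.2 ∈ cs' := by cases hx with
          | head => exact absurd rfl hxc
          | tail _ h => exact h
        have hxlt : x.2 < c := hlt _ hx'
        have h1 : ∀ y ∈ g c, (fun a b => decide (b.2 < a.2)) x y = false := by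
          intro y hy
          have hyc := hg c (by simp) y hy
          simp only [hyc, decide_eq_false_iff_not, not_lt]
          omega
        rw [List.flatMap_cons,
          pvInsertBy_append (fun a b => decide (b.2 < a.2)) x (g c) (cs'.flatMap g) h1,
          ih (List.pairwise_cons.1 hcs).2 (fun c' hc' => hg c' (by simp [hc'])) hx',
          List.flatMap_cons, if_neg hxc]
        simp

theorem pvGroupSort (xs : List (Int × Int)) (cs : List Int)
    (hcs : cs.Pairwise (· > ·)) (hmem : ∀ p ∈ xs, p.2 ∈ cs) :
    PySem.List.sorted xs (fun p => p.2) true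
      = cs.flatMap (fun c => xs.filter (fun p => p.2 == c)) := by
  induction xs using List.reverseRecOn with
  | nil => simp [PySem.List.sorted]
  | append_singleton ys x ih =>
      rw [PySem.List.sorted_rev_eq_foldl_insertBy, List.foldl_append, List.foldl_cons,
        List.foldl_nil, ← PySem.List.sorted_rev_eq_foldl_insertBy,
        ih (fun p hp => hmem p (by simp [hp])),
        pvInsert_grouped cs x _ hcs
          (fun c _ p hp => by simpa using (List.mem_filter.1 hp).2)
          (hmem x (by simp))]
      apply List.flatMap_congr
      intro c _
      by_cases h : x.2 = c <;> simp [h]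

theorem pvTakeAppend_spec (l out : List Int) (h : out.length < 400) :
    pvTakeAppend out l = if (out ++ l).length < 400 then (out ++ l, false)
      else ((out ++ l).take 400, true) := by
  induction l generalizing out with
  | nil => simp [pvTakeAppend]; omega
  | cons x rest ih =>
      simp only [pvTakeAppend]
      by_cases h4 : (out ++ [x]).length = 400
      · rw [if_pos h4]
        have : ¬ (out ++ x :: rest).length < 400 := by simp at h4 ⊢; omega
        rw [if_neg this]
        have : (out ++ x :: rest).take 400 = out ++ [x] := by
          have : out ++ x :: rest = (out ++ [x]) ++ rest := by simp
          rw [this, List.take_append_of_le_length (by simp at h4 ⊢; omega),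
            List.take_of_length_le (by simp at h4 ⊢; omega)]
        rw [this]
      · rw [if_neg h4, ih (out ++ [x]) (by simp at h4 ⊢; omega)]
        have : (out ++ [x]) ++ rest = out ++ x :: rest := by simp
        rw [this]

theorem pvCollect_spec (b : PySem.Dict Int (List Int)) (m : Nat) (out : List Int)
    (h : out.length < 400) :
    pvCollect b m out = (out ++ (pvDescList m).flatMap (fun c => b.getD c [])).take 400 := by
  induction m generalizing out with
  | zero => simp [pvCollect, pvDescList, List.take_of_length_le (by omega : out.length ≤ 400)]
  | succ k ih =>
      rw [pvCollect, pvTakeAppend_spec _ _ h]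
      by_cases hlt : (out ++ b.getD ((k : Int) + 1) []).length < 400
      · rw [if_pos hlt]
        show pvCollect b k (out ++ b.getD ((k : Int) + 1) []) = _
        rw [ih _ hlt]
        simp [pvDescList]
      · rw [if_neg hlt]
        show (out ++ b.getD ((k : Int) + 1) []).take 400 = _
        have : out ++ (pvDescList (k+1)).flatMap (fun c => b.getD c [])
            = (out ++ b.getD ((k : Int) + 1) []) ++ (pvDescList k).flatMap (fun c => b.getD c []) := by
          simp [pvDescList]
        rw [this]
        exact (List.take_append_of_le_length (by omega)).symm

-- ===== VERDICT (by name: the statement is the Claim_ definition above) =====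
theorem candidate_indices_py_spec : Claim_equal_candidate_indices_py := by
  intro qt ti _
  unfold Spec_candidate_indices_py candidate_indices_py candidate_indices_py_alt
  by_cases hqt : qt = []
  · simp [hqt]
  · simp only [if_neg hqt]
    set tidx := PySem.Dict.ofList ti with htidx
    set flat := qt.flatMap (fun tok => tidx.getD tok []) with hflat
    have hA : qt.foldl
        (fun d tok => (tidx.getD tok []).foldl (fun d idx => d.modify idx 0 (· + 1)) d)
        (PySem.Dict.empty : PySem.Dict Int Int) = PySem.Dict.counter flat := by
      rw [PySem.Dict.counter_eq_foldl, hflat, List.foldl_flatMap]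
    have hB : qt.foldl
        (fun d tok => (tidx.getD tok []).foldl (fun d idx => d.insert idx (d.getD idx 0 + 1)) d)
        (PySem.Dict.empty : PySem.Dict Int Int) = PySem.Dict.counter flat := by
      rw [← PySem.Dict.foldl_insert_getD_add_one_eq_counter, hflat, List.foldl_flatMap]
    rw [hA, hB]
    set C := PySem.Dict.counter flat with hC
    by_cases hitems : C.items = []
    · simp [hitems]
    · simp only [if_neg hitems]
      set buckets := C.items.foldl (fun d p => d.modify p.2 [] (· ++ [p.1])) PySem.Dict.empty
        with hbuckets
      have hkeys : buckets.keys = PySem.Set.ofList (C.items.map (fun p => p.2)) := by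
        rw [hbuckets, PySem.Dict.keys_foldl_modify_key C.items (fun p => p.2) [] (fun _ p => (· ++ [p.1])),
          show (PySem.Dict.empty : PySem.Dict Int (List Int)).keys = [] from rfl]
        exact PySem.Set.update_empty _
      have hgetD : ∀ c, buckets.getD c [] = (C.items.filter (fun p => p.2 == c)).map (fun p => p.1) := by
        intro c
        have := PySem.Dict.getD_foldl_modify_append (C.items.map Prod.swap) PySem.Dict.empty c
        rw [hbuckets]
        rw [show (C.items.foldl (fun d p => d.modify p.2 [] (· ++ [p.1])) PySem.Dict.empty)
            = ((C.items.map Prod.swap).foldl (fun d p => d.modify p.1 [] (· ++ [p.2])) PySem.Dict.empty)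
          from (List.foldl_map (f := Prod.swap) (g := fun (d : PySem.Dict Int (List Int)) (p : Int × Int) => d.modify p.1 [] (· ++ [p.2]))).symm]
        rw [this, PySem.Dict.getD_empty, List.filter_map, List.map_map]
        simp [Function.comp_def, Prod.swap]
      -- count values are at least 1
      have hpos : ∀ p ∈ C.items, 1 ≤ p.2 := by
        intro p hp
        rw [hC, PySem.Dict.items_counter] at hp
        obtain ⟨k, hk, rfl⟩ := List.mem_map.1 hp
        have : k ∈ flat := (PySem.Set.mem_ofList flat k).1 hk
        have := List.count_pos_iff.2 this
        simp; omega
      -- buckets is nonempty, so max? returns its maximum key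
      have hkeysne : buckets.keys ≠ [] := by
        cases hic : C.items with
        | nil => exact absurd hic hitems
        | cons p rest =>
          rw [hkeys, hic]
          simp [PySem.Set.ofList_cons]
      obtain ⟨mx, hmx⟩ : ∃ mx, PySem.List.max? buckets.keys (fun c => c) = some mx := by
        cases h : PySem.List.max? buckets.keys (fun c => c) with
        | none => exact absurd ((PySem.List.max?_eq_none_iff _ _).1 h) hkeysne
        | some m => exact ⟨m, rfl⟩
      have hmxmem : mx ∈ buckets.keys := PySem.List.max?_mem hmx
      have hmxkeys : ∀ c ∈ buckets.keys, c ≤ mx := PySem.List.max?_isMax hmx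
      have hmemkeys : ∀ p ∈ C.items, p.2 ∈ buckets.keys := by
        intro p hp
        rw [hkeys]
        exact (PySem.Set.mem_ofList _ _).2 (List.mem_map.2 ⟨p, hp, rfl⟩)
      have hmx1 : 1 ≤ mx := by
        rw [hkeys] at hmxmem
        obtain ⟨p, hp, rfl⟩ := List.mem_map.1 ((PySem.Set.mem_ofList _ _).1 hmxmem)
        exact hpos p hp
      have hmxnat : ((mx.toNat : Nat) : Int) = mx := Int.toNat_of_nonneg (by omega)
      have hmatch : (match PySem.List.max? buckets.keys (fun c => c) with
          | none => ([] : List Int)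
          | some mx => pvCollect buckets mx.toNat []) = pvCollect buckets mx.toNat [] := by
        rw [hmx]
      rw [hmatch, pvCollect_spec buckets mx.toNat [] (by simp)]
      rw [pvGroupSort C.items (pvDescList mx.toNat) (pvPairwise_descList _)
        (fun p hp => (pvMem_descList _ _).2 ⟨hpos p hp, by rw [hmxnat]; exact hmxkeys _ (hmemkeys p hp)⟩)]
      rw [List.map_take, List.map_flatMap]
      simp only [List.nil_append]
      congr 1
      exact (List.flatMap_congr (fun c _ => (hgetD c))).symm
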